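-- pv_equiv track=rewrite | github.com/maflister/enhancer-dissection | clustal_format_highlighter.py | append_stars
-- ===== SOURCE A (Python) =====
-- def append_stars(max_len, rows_to_compare,):
--     padding = generate_padding_string(max_len, 'Stars')
--
--     star_str = 'stars' + padding + ': '
--     check_list = set()
--     for index, rows in enumerate(rows_to_compare):
--         check_list.add(len(rows))
--     if len(rows_to_compare) > 0:
--         star_str += generate_continuity_stars(rows_to_compare)
--     star_str += '<br>'
--
--     return star_str
--
-- def generate_padding_string(max_len, key):
--     ##Pads out the keys so it lines everything up properly
--     padding_str = " "
--     if max_len > len(key):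
--         padding = max_len - len(key)
--         for x in range(padding):
--             padding_str += " "
--     return padding_str
--
-- def generate_continuity_stars(row_list):
--     #Generates the stars for a list of 70 length strings
--     star_string = ""
--     for index, char in enumerate(row_list[-1]):
--         chars_at_index = set()
--         #Add all the characters at a single index to a set
--         for row in row_list:
--             chars_at_index.add(row[index][0])
--             #If we have multiple chars at an index then we want empty
--         if len(chars_at_index) > 1:
--             star_string += ' '
--         else: #else put a star there
--             star_string += "*"
--
--     return star_string
-- ===== SOURCE B (Python) =====
-- def append_stars(max_len, rows_to_compare):
--     # Row-major: compare every row against the last (reference) row once,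
--     # instead of building a per-column set of characters.
--     pad = ' ' * (1 + max(0, max_len - 5))
--     out = 'stars' + pad + ': '
--     if rows_to_compare:
--         ref = rows_to_compare[-1]
--         same = [True] * len(ref)
--         for row in rows_to_compare:
--             same = [s and x[:1] == y[:1] for s, x, y in zip(same, row, ref)]
--         out += ''.join('*' if s else ' ' for s in same)
--     return out + '<br>'
-- ===== Notes on version B (the rewrite author's own statement) =====
-- stated objective: alternative
-- what changed: Column-major per-index set construction (a fresh set of characters per column, tested for size>1) is replaced by a row-major sweep that keeps one boolean 'same' mask and ands in each row's agreement with the last (reference) row via zip, with the dead check_list loop dropped and the padding computed in closed form instead of a loop.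
import Mathlib
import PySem

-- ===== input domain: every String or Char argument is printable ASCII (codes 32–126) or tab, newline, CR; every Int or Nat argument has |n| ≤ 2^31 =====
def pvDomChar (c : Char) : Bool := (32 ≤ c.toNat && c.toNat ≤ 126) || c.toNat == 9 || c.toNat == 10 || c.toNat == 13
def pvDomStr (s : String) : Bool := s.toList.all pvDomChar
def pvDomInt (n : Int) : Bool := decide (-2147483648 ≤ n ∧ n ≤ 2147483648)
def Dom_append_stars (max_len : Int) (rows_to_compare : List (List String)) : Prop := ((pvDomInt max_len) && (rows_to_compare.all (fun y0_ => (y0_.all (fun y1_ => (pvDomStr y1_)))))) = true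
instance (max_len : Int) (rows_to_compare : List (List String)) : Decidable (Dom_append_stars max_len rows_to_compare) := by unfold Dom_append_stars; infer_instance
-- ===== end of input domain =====

-- B replaces A's column-major per-index character set by a row-major boolean
-- mask compared against the last row (objective: alternative decomposition).

-- ===== PORT A =====
-- generate_padding_string(max_len, key)
def pvGPS (max_len : Int) (key : String) : String :=
  let padding_str := " "
  if max_len > PySem.Str.len key then
    let padding := max_len - PySem.Str.len key
    (PySem.List.pyRange 0 padding 1).foldl (fun s _ => s ++ " ") padding_str
  else padding_str

-- row[index][0]; none where Python raises IndexError (those inputs are outside Pre_)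
def pvCharAt (row : List String) (i : Int) : Option Char :=
  match PySem.List.pyGet? row i with
  | some s => PySem.Str.pyGet? s 0
  | none => none

-- generate_continuity_stars(row_list)
def pvGCS (row_list : List (List String)) : String :=
  let lastRow := (PySem.List.pyGet? row_list (-1)).getD []
  (PySem.List.enumerate lastRow 0).foldl (fun star_string p =>
    let chars_at_index :=
      row_list.foldl (fun s row => PySem.Set.add s (pvCharAt row p.1)) PySem.Set.empty
    if PySem.Set.len chars_at_index > 1 then star_string ++ " " else star_string ++ "*") ""

def append_stars (max_len : Int) (rows_to_compare : List (List String)) : String :=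
  let padding := pvGPS max_len "Stars"
  let star_str := "stars" ++ padding ++ ": "
  let _check_list :=
    rows_to_compare.foldl (fun s rows => PySem.Set.add s (PySem.List.len rows)) PySem.Set.empty
  let star_str :=
    if PySem.List.len rows_to_compare > 0 then star_str ++ pvGCS rows_to_compare else star_str
  star_str ++ "<br>"

-- ===== PORT B =====
-- x[:1]
def pvFirst (s : String) : String := PySem.Str.slice s none (some 1)

-- [s and x[:1] == y[:1] for s, x, y in zip(same, row, ref)]
def pvStepB (ref : List String) (same : List Bool) (row : List String) : List Bool :=
  (same.zip (row.zip ref)).map (fun p => p.1 && (pvFirst p.2.1 == pvFirst p.2.2))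

def append_stars_alt (max_len : Int) (rows_to_compare : List (List String)) : String :=
  -- ' ' * (1 + max(0, max_len - 5)) : ported by hand, exact (repetition of a one-char string)
  let pad := String.ofList (List.replicate (1 + max 0 (max_len - 5)).toNat ' ')
  let out := "stars" ++ pad ++ ": "
  match rows_to_compare.getLast? with   -- 'if rows_to_compare:' then ref = rows_to_compare[-1]
  | none => out ++ "<br>"
  | some ref =>
    let same := rows_to_compare.foldl (pvStepB ref) (List.replicate ref.length true)
    (out ++ PySem.Str.join "" (same.map (fun s => if s then "*" else " "))) ++ "<br>"

-- ===== PRECONDITION & SPEC =====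
-- Pre_: exactly the inputs where A returns (no IndexError): every row must be at least as long
-- as the last row and the strings in that prefix must be non-empty.
def Pre_append_stars (max_len : Int) (rows_to_compare : List (List String)) : Prop :=
  ∀ r ∈ rows_to_compare,
    (rows_to_compare.getLast?.getD []).length ≤ r.length ∧
    ∀ s ∈ r.take (rows_to_compare.getLast?.getD []).length, s ≠ ""
instance (max_len : Int) (rows_to_compare : List (List String)) : Decidable (Pre_append_stars max_len rows_to_compare) := by unfold Pre_append_stars; infer_instance

def pvWitness_append_stars : Int × List (List String) := (7, [["ab", "c"], ["a", "d"]])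

def Spec_append_stars (max_len : Int) (rows_to_compare : List (List String)) (out : String) : Prop := out = append_stars_alt max_len rows_to_compare
instance (max_len : Int) (rows_to_compare : List (List String)) (out : String) : Decidable (Spec_append_stars max_len rows_to_compare out) := by unfold Spec_append_stars; infer_instance

-- ===== CLAIM (what is proved, stated in full; the proofs are below) =====
def Claim_equal_append_stars : Prop := ∀ (max_len : Int) (rows_to_compare : List (List String)), Dom_append_stars max_len rows_to_compare → Pre_append_stars max_len rows_to_compare → Spec_append_stars max_len rows_to_compare (append_stars max_len rows_to_compare)

-- ===== LEMMAS AND PROOFS =====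

theorem pv_foldl_append_toList {α : Type} (g : α → String) (l : List α) (init : String) :
    (l.foldl (fun acc x => acc ++ g x) init).toList
      = init.toList ++ (l.map (fun x => (g x).toList)).flatten := by
  induction l generalizing init with
  | nil => simp
  | cons a t ih => simp [List.foldl_cons, ih, String.toList_append]

theorem pv_flatten_const {α : Type} (l : List α) :
    (l.map (fun _ => [' '])).flatten = List.replicate l.length ' ' := by
  induction l with
  | nil => rfl
  | cons a t ih => simp [ih, List.replicate_succ]

theorem pvGPS_toList (max_len : Int) :
    (pvGPS max_len "Stars").toList = List.replicate (1 + max 0 (max_len - 5)).toNat ' ' := by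
  unfold pvGPS
  have h5 : PySem.Str.len "Stars" = 5 := by decide
  rw [h5]
  by_cases h : max_len > 5
  · rw [if_pos h, pv_foldl_append_toList]
    have hsp : (" ".toList) = [' '] := rfl
    simp only [hsp]
    rw [pv_flatten_const]
    have hlen : (PySem.List.pyRange 0 (max_len - 5) 1).length = (max_len - 5).toNat := by
      simp [PySem.List.length_pyRange_one]
    rw [hlen]
    have : (1 + max 0 (max_len - 5)).toNat = 1 + (max_len - 5).toNat := by omega
    rw [this, Nat.add_comm 1 ((max_len - 5).toNat), List.replicate_succ]
    rfl
  · rw [if_neg h]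
    have : (1 + max 0 (max_len - 5)).toNat = 1 := by omega
    rw [this]
    rfl

theorem pv_set_card_le_one_iff {α : Type} [BEq α] [LawfulBEq α] (l : List α) :
    (PySem.Set.ofList l).length ≤ 1 ↔ ∀ a ∈ l, ∀ b ∈ l, a = b := by
  constructor
  · intro h a ha b hb
    have ha' : a ∈ PySem.Set.ofList l := (PySem.Set.mem_ofList l a).mpr ha
    have hb' : b ∈ PySem.Set.ofList l := (PySem.Set.mem_ofList l b).mpr hb
    match e : PySem.Set.ofList l with
    | [] => rw [e] at ha'; simp at ha'
    | [x] =>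
      rw [e] at ha' hb'
      simp at ha' hb'; rw [ha', hb']
    | x :: y :: t => rw [e] at h; simp at h
  · intro h
    by_contra hlen
    push_neg at hlen
    have hnd := PySem.Set.nodup_ofList l
    match e : PySem.Set.ofList l with
    | [] => rw [e] at hlen; simp at hlen
    | [x] => rw [e] at hlen; simp at hlen
    | x :: y :: t =>
      rw [e] at hnd
      have hxy : x ≠ y := by
        have := List.nodup_cons.mp hnd
        simp at this
        exact fun hh => this.1.1 hh
      have hx : x ∈ l := (PySem.Set.mem_ofList l x).mp (by rw [e]; simp)
      have hy : y ∈ l := (PySem.Set.mem_ofList l y).mp (by rw [e]; simp)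
      exact hxy (h x hx y hy)

-- over-index form of B's per-column agreement test
def pvAgree (ref row : List String) (k : Nat) : Bool :=
  pvFirst (row.getD k "") == pvFirst (ref.getD k "")

theorem pv_stepB_getElem (ref same : List _) (row : List String) (k : Nat)
    (hk : k < (pvStepB ref same row).length) (hs : k < same.length)
    (hr : k < row.length) (hf : k < ref.length) :
    (pvStepB ref same row)[k] = (same[k] && pvAgree ref row k) := by
  unfold pvStepB pvAgree
  simp [List.getElem_zip, List.getD_eq_getElem, hs, hr, hf]

theorem pv_stepB_length (ref same : List _) (row : List String) :
    (pvStepB ref same row).length = min same.length (min row.length ref.length) := by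
  simp [pvStepB]

theorem pv_foldB (ref : List String) (rows : List (List String))
    (hlen : ∀ r ∈ rows, ref.length ≤ r.length) (same : List Bool)
    (hs : same.length = ref.length) :
    rows.foldl (pvStepB ref) same
      = (List.range ref.length).map
          (fun k => same.getD k true && rows.all (fun row => pvAgree ref row k)) := by
  induction rows generalizing same with
  | nil =>
    simp only [List.foldl_nil, List.all_nil, Bool.and_true]
    apply List.ext_getElem
    · simp [hs]
    · intro k h1 h2
      have hk : k < ref.length := by simpa using h2
      simp [List.getD_eq_getElem, hs, hk]
  | cons r t ih =>
    simp only [List.foldl_cons]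
    have hlr : ref.length ≤ r.length := hlen r List.mem_cons_self
    have hlen' : ∀ x ∈ t, ref.length ≤ x.length := fun x hx => hlen x (List.mem_cons_of_mem _ hx)
    have hslen : (pvStepB ref same r).length = ref.length := by
      rw [pv_stepB_length]; omega
    rw [ih hlen' _ hslen]
    apply List.map_congr_left
    intro k hk
    have hk' : k < ref.length := List.mem_range.mp hk
    rw [List.getD_eq_getElem _ _ (by omega : k < (pvStepB ref same r).length),
        pv_stepB_getElem ref same r k (by omega) (by omega) (by omega) (by omega)]
    rw [List.getD_eq_getElem _ _ (by omega : k < same.length)]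
    simp [Bool.and_assoc]

theorem pv_toList_ne_nil (s : String) (h : s ≠ "") : s.toList ≠ [] := by
  intro hc
  apply h
  apply String.toList_inj.mp
  simpa using hc

theorem pv_first_eq_iff (s t : String) (hs : s ≠ "") (ht : t ≠ "") :
    ((pvFirst s == pvFirst t) = true) ↔ PySem.Str.pyGet? s 0 = PySem.Str.pyGet? t 0 := by
  rw [beq_iff_eq]
  have hs' := pv_toList_ne_nil s hs
  have ht' := pv_toList_ne_nil t ht
  unfold pvFirst
  rw [← String.toList_inj]
  rw [PySem.Str.toList_slice, PySem.Str.toList_slice]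
  simp only [PySem.Chars.slice_eq_listSlice]
  rw [PySem.List.slice_to _ (by norm_num : (0:Int) ≤ 1),
      PySem.List.slice_to _ (by norm_num : (0:Int) ≤ 1)]
  rw [show PySem.Str.pyGet? s 0 = PySem.List.pyGet? s.toList 0 by simp,
      show PySem.Str.pyGet? t 0 = PySem.List.pyGet? t.toList 0 by simp]
  rw [PySem.List.pyGet?_zero, PySem.List.pyGet?_zero]
  match e1 : s.toList, e2 : t.toList with
  | [], _ => exact absurd e1 hs'
  | _ :: _, [] => exact absurd e2 ht'
  | c :: cs, d :: ds => simp

theorem pv_flatten_singletons {α β : Type} (h : α → β) (l : List α) :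
    (l.map (fun x => [h x])).flatten = l.map h := by
  induction l with
  | nil => rfl
  | cons a t ih => simp [ih]


theorem pv_join_toList (l : List Bool) :
    (PySem.Str.join "" (l.map (fun s => if s then "*" else " "))).toList
      = l.map (fun s => if s then '*' else ' ') := by
  rw [PySem.Str.toList_join, List.map_map]
  have h1 : l.map (String.toList ∘ fun s => if s then "*" else " ")
      = l.map (fun s => [if s then '*' else ' ']) := by
    apply List.map_congr_left
    intro a _
    cases a <;> rfl
  rw [h1]
  have h2 : l.map (fun s => [if s then '*' else ' '])
      = (l.map (fun s => if s then '*' else ' ')).map (fun c => [c]) := by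
    rw [List.map_map]
    apply List.map_congr_left
    intro a _
    rfl
  rw [h2, show ("".toList) = ([] : List Char) from rfl, PySem.Chars.join_nil_singletons]

-- per-column equivalence of A's set test with B's agreement test
theorem pv_col_iff (rows : List (List String)) (ref : List String)
    (href : rows.getLast? = some ref)
    (hpre : ∀ r ∈ rows, ref.length ≤ r.length ∧ ∀ s ∈ r.take ref.length, s ≠ "")
    (k : Nat) (hk : k < ref.length) :
    ((PySem.Set.ofList (rows.map (fun row => pvCharAt row (k : Int)))).length ≤ 1
      ↔ rows.all (fun row => pvAgree ref row k) = true) := by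
  have hrefmem : ref ∈ rows := by
    have := List.getLast?_eq_some_iff.mp href
    obtain ⟨l', hl'⟩ := this
    rw [hl']; simp
  have hchar : ∀ r ∈ rows, pvCharAt r (k : Int) = PySem.Str.pyGet? (r.getD k "") 0 := by
    intro r hr
    have hlr : ref.length ≤ r.length := (hpre r hr).1
    unfold pvCharAt
    rw [PySem.List.pyGet?_natCast]
    rw [List.getElem?_eq_getElem (by omega : k < r.length)]
    rw [List.getD_eq_getElem _ _ (by omega : k < r.length)]
  have hne : ∀ r ∈ rows, r.getD k "" ≠ "" := by
    intro r hr
    have hlr : ref.length ≤ r.length := (hpre r hr).1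
    rw [List.getD_eq_getElem _ _ (by omega : k < r.length)]
    exact (hpre r hr).2 _ (by
      apply List.mem_take_iff_getElem.mpr
      exact ⟨k, by omega, rfl⟩)
  rw [pv_set_card_le_one_iff, List.all_eq_true]
  constructor
  · intro h row hrow
    rw [pvAgree, pv_first_eq_iff _ _ (hne row hrow) (hne ref hrefmem)]
    rw [← hchar row hrow, ← hchar ref hrefmem]
    exact h _ (List.mem_map_of_mem hrow) _ (List.mem_map_of_mem hrefmem)
  · intro h a ha b hb
    obtain ⟨ra, hra, rfl⟩ := List.mem_map.mp ha
    obtain ⟨rb, hrb, rfl⟩ := List.mem_map.mp hb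
    have h1 := (pv_first_eq_iff _ _ (hne ra hra) (hne ref hrefmem)).mp (h ra hra)
    have h2 := (pv_first_eq_iff _ _ (hne rb hrb) (hne ref hrefmem)).mp (h rb hrb)
    rw [hchar ra hra, hchar rb hrb, h1, h2]

-- A's star string, column-major, as a list of characters
theorem pvGCS_toList (rows : List (List String)) (ref : List String)
    (href : rows.getLast? = some ref) :
    (pvGCS rows).toList
      = (List.range ref.length).map (fun (k : Nat) =>
          if 1 < (PySem.Set.ofList (rows.map (fun row => pvCharAt row ((k : Nat) : Int)))).length
          then ' ' else '*') := by
  unfold pvGCS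
  rw [PySem.List.pyGet?_neg_one, href]
  simp only [Option.getD_some]
  have hfold :
      (PySem.List.enumerate ref 0).foldl (fun star_string p =>
        let chars_at_index :=
          rows.foldl (fun s row => PySem.Set.add s (pvCharAt row p.1)) PySem.Set.empty
        if PySem.Set.len chars_at_index > 1 then star_string ++ " " else star_string ++ "*") ""
      = (PySem.List.enumerate ref 0).foldl (fun star_string p =>
          star_string ++ (if 1 < (PySem.Set.ofList (rows.map (fun row => pvCharAt row p.1))).length
            then " " else "*")) "" := by
    apply PySem.List.foldl_congr_mem
    intro acc p _
    show (if PySem.Set.len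
        (rows.foldl (fun s row => PySem.Set.add s (pvCharAt row p.1)) PySem.Set.empty) > 1
      then acc ++ " " else acc ++ "*")
      = acc ++ (if 1 < (PySem.Set.ofList (rows.map (fun row => pvCharAt row p.1))).length
          then " " else "*")
    have hset : rows.foldl (fun s row => PySem.Set.add s (pvCharAt row p.1)) PySem.Set.empty
        = PySem.Set.ofList (rows.map (fun row => pvCharAt row p.1)) := by
      rw [PySem.Set.ofList_eq_foldl, List.foldl_map]
      rfl
    rw [hset]
    have hiff : (PySem.Set.len (PySem.Set.ofList (rows.map (fun row => pvCharAt row p.1))) > 1)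
        ↔ 1 < (PySem.Set.ofList (rows.map (fun row => pvCharAt row p.1))).length := by
      unfold PySem.Set.len
      constructor <;> intro <;> omega
    split_ifs with h1 h2 h2
    · rfl
    · exact absurd (hiff.mp h1) h2
    · exact absurd (hiff.mpr h2) h1
    · rfl
  rw [hfold, pv_foldl_append_toList]
  have hsing : ∀ (p : Int × String),
      ((if 1 < (PySem.Set.ofList (rows.map (fun row => pvCharAt row p.1))).length
        then " " else "*") : String).toList
      = [if 1 < (PySem.Set.ofList (rows.map (fun row => pvCharAt row p.1))).length
          then ' ' else '*'] := by
    intro p; split_ifs <;> rfl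
  simp only [hsing]
  rw [pv_flatten_singletons (fun p : Int × String =>
    if 1 < (PySem.Set.ofList (rows.map (fun row => pvCharAt row p.1))).length then ' ' else '*')]
  have : (PySem.List.enumerate ref 0).map (fun p =>
      if 1 < (PySem.Set.ofList (rows.map (fun row => pvCharAt row p.1))).length then ' ' else '*')
      = ((PySem.List.enumerate ref 0).map (fun p => p.1)).map (fun i =>
      if 1 < (PySem.Set.ofList (rows.map (fun row => pvCharAt row i))).length then ' ' else '*') := by
    rw [List.map_map]; rfl
  rw [this, PySem.List.map_fst_enumerate]
  simp only [zero_add]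
  rw [PySem.List.pyRange_one]
  rw [List.map_map]
  simp

-- ===== VERDICT (by name: the statement is the Claim_ definition above) =====
theorem append_stars_spec : Claim_equal_append_stars := by
  intro max_len rows _hdom hpre
  unfold Spec_append_stars
  cases hrows : rows.getLast? with
  | none =>
    have hnil : rows = [] := by
      cases rows with
      | nil => rfl
      | cons a t => simp [List.getLast?_eq_some_iff] at hrows
    subst hnil
    simp only [append_stars, append_stars_alt, List.getLast?_nil]
    rw [if_neg (by simp [PySem.List.len])]
    apply String.toList_inj.mp
    simp [String.toList_append, pvGPS_toList]
  | some ref =>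
    have hne : rows ≠ [] := by
      intro hc; rw [hc] at hrows; simp at hrows
    simp only [append_stars, append_stars_alt, hrows]
    rw [if_pos (by
      simp only [PySem.List.len_eq]
      have : 0 < rows.length := List.length_pos_iff.mpr hne
      omega)]
    have hpre' : ∀ r ∈ rows, ref.length ≤ r.length ∧ ∀ s ∈ r.take ref.length, s ≠ "" := by
      intro r hr
      have := hpre r hr
      rwa [hrows] at this
    have hsame : rows.foldl (pvStepB ref) (List.replicate ref.length true)
        = (List.range ref.length).map (fun k => rows.all (fun row => pvAgree ref row k)) := by
      rw [pv_foldB ref rows (fun r hr => (hpre' r hr).1) _ (by simp)]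
      apply List.map_congr_left
      intro k hk
      rw [List.getD_replicate _ (List.mem_range.mp hk)]
      simp
    apply String.toList_inj.mp
    simp only [String.toList_append]
    rw [pvGPS_toList, pvGCS_toList rows ref hrows]
    rw [hsame]
    rw [pv_join_toList]
    have hcols : (List.range ref.length).map (fun (k : Nat) =>
        if 1 < (PySem.Set.ofList (rows.map (fun row => pvCharAt row ((k : Nat) : Int)))).length
        then ' ' else '*')
        = (List.range ref.length).map (fun k =>
            if rows.all (fun row => pvAgree ref row k) then '*' else ' ') := by
      apply List.map_congr_left
      intro k hk
      have hk' : k < ref.length := List.mem_range.mp hk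
      have := pv_col_iff rows ref hrows hpre' k hk'
      by_cases hset : 1 < (PySem.Set.ofList (rows.map (fun row => pvCharAt row (k : Int)))).length
      · rw [if_pos hset]
        have : ¬ rows.all (fun row => pvAgree ref row k) = true := by
          intro hall; have := this.mpr hall; omega
        simp [this]
      · rw [if_neg hset]
        have : rows.all (fun row => pvAgree ref row k) = true := this.mp (by omega)
        simp [this]
    rw [hcols]
    simp [String.toList_append]
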